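-- pv_equiv track=rewrite | github.com/fursdominik/Lois | Lab_1/main_functions.py | get_spaces_count
-- ===== SOURCE A (Python) =====
-- def get_spaces_count(input):
--     count = 0
--     for char in input:
--         if char.isspace():
--             count += 1
--         elif char.isalpha():
--             break  # Прерывает цикл при обнаружении первой буквы
--     return count
-- ===== SOURCE B (Python) =====
-- def get_spaces_count(input):
--     # locate the first alphabetic character, then count whitespace in the prefix before it
--     prefix = input
--     for i, ch in enumerate(input):
--         if ch.isalpha():
--             prefix = input[:i]
--             break
--     return sum(1 for c in prefix if c.isspace())
-- ===== Notes on version B (the rewrite author's own statement) =====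
-- stated objective: idiomatic
-- what changed: Replaced the single early-exit counting loop by a two-phase decomposition: first find the prefix up to the first alphabetic character, then count whitespace in that prefix with a sum over a generator.
import Mathlib
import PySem

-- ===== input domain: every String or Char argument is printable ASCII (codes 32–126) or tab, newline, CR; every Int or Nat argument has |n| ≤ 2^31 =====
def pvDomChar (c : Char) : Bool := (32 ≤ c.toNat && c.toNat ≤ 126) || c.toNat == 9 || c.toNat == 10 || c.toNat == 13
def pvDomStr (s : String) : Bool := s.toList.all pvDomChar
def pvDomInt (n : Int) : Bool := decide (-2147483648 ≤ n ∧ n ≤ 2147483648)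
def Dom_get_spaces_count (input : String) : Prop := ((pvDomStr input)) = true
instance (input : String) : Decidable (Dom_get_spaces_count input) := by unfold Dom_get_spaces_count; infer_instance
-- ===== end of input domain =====

-- B replaces A's single early-exit counting loop by a locate-prefix-then-count decomposition (idiomatic, same cost).


-- ===== PORT A =====
-- A's loop: for char in input, count spaces, break at the first alphabetic char.
def pvALoop : List Char → Int → Int
  | [], count => count
  | c :: rest, count =>
    if PySem.Chars.isspace c then pvALoop rest (count + 1)
    else if PySem.Chars.isalpha c then count
    else pvALoop rest count

def get_spaces_count (input : String) : Int := pvALoop input.toList 0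

-- ===== PORT B =====
-- B: take the prefix before the first alphabetic char, then count whitespace in it.
def get_spaces_count_alt (input : String) : Int :=
  let pre := input.toList.takeWhile (fun c => !PySem.Chars.isalpha c)
  ((pre.countP (fun c => PySem.Chars.isspace c) : Nat) : Int)

-- ===== PRECONDITION & SPEC =====
def Spec_get_spaces_count (input : String) (out : Int) : Prop := out = get_spaces_count_alt input
instance (input : String) (out : Int) : Decidable (Spec_get_spaces_count input out) := by unfold Spec_get_spaces_count; infer_instance

-- ===== CLAIM (what is proved, stated in full; the proofs are below) =====
def Claim_equal_get_spaces_count : Prop := ∀ (input : String), Dom_get_spaces_count input → Spec_get_spaces_count input (get_spaces_count input)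

-- ===== LEMMAS AND PROOFS =====
theorem pv_space_not_alpha (c : Char) (h : PySem.Chars.isspace c = true) :
    PySem.Chars.isalpha c = false := by
  have hA : ('A':Char).val.toNat = 65 := rfl
  have hZ : ('Z':Char).val.toNat = 90 := rfl
  have ha : ('a':Char).val.toNat = 97 := rfl
  have hz : ('z':Char).val.toNat = 122 := rfl
  simp only [PySem.Chars.isspace, PySem.Chars.isalpha, PySem.Chars.isupper, PySem.Chars.islower,
    Char.le_def, Char.toNat, Bool.or_eq_true, Bool.and_eq_true, decide_eq_true_eq,
    Bool.or_eq_false_iff, Bool.and_eq_false_iff, decide_eq_false_iff_not, not_le,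
    UInt32.le_iff_toNat_le] at *
  omega

theorem pvALoop_eq (l : List Char) (count : Int) :
    pvALoop l count =
      count + ((l.takeWhile (fun c => !PySem.Chars.isalpha c)).countP
        (fun c => PySem.Chars.isspace c) : Nat) := by
  induction l generalizing count with
  | nil => simp [pvALoop]
  | cons c rest ih =>
    by_cases hs : PySem.Chars.isspace c = true
    · have ha := pv_space_not_alpha c hs
      simp [pvALoop, hs, ha, ih]
      ring
    · by_cases ha : PySem.Chars.isalpha c = true
      · simp [pvALoop, hs, ha]
      · simp [pvALoop, hs, ha, ih]

-- ===== VERDICT (by name: the statement is the Claim_ definition above) =====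
theorem get_spaces_count_spec : Claim_equal_get_spaces_count := by
  intro input _
  show get_spaces_count input = get_spaces_count_alt input
  simp [get_spaces_count, get_spaces_count_alt, pvALoop_eq]
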